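-- pv_equiv track=rewrite | github.com/NUS-ISS-Projects/bigData | analytics/detailed_data_probe.py | _is_hardcoded_text
-- ===== SOURCE A (Python) =====
-- def _is_hardcoded_text(text: str) -> bool:
--     """Check if text appears to be hardcoded"""
--     hardcoded_indicators = [
--         "analysis reveals", "patterns indicate", "shows current performance",
--         "use the executive", "monitor economic indicator", "regular review",
--         "dashboard provides", "comprehensive view", "strategic insights"
--     ]
--
--     text_lower = text.lower()
--     return any(indicator in text_lower for indicator in hardcoded_indicators)
-- ===== SOURCE B (Python) =====
-- INDICATOR_PHRASES = [
--     "analysis reveals", "patterns indicate", "shows current performance",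
--     "use the executive", "monitor economic indicator", "regular review",
--     "dashboard provides", "comprehensive view", "strategic insights"
-- ]
--
--
-- def _is_hardcoded_text(text: str) -> bool:
--     """Detect hardcoded text in a single left-to-right pass: simulate an NFA
--     over the indicator phrases, keeping the yet-unmatched suffix of every
--     phrase whose beginning was matched by the characters just read."""
--     active = []
--     for ch in text.lower():
--         new_active = []
--         for rest in active + INDICATOR_PHRASES:
--             if rest[0] == ch:
--                 if len(rest) == 1:
--                     return True
--                 new_active.append(rest[1:])
--         active = new_active
--     return False
-- ===== Notes on version B (the rewrite author's own statement) =====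
-- stated objective: alternative
-- what changed: Replaces nine independent substring-containment searches (one full scan of the text per indicator) with a single left-to-right pass that simulates an NFA over the indicator phrases, maintaining the set of active partial matches (remaining indicator suffixes) and returning as soon as one completes.
import Mathlib
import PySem

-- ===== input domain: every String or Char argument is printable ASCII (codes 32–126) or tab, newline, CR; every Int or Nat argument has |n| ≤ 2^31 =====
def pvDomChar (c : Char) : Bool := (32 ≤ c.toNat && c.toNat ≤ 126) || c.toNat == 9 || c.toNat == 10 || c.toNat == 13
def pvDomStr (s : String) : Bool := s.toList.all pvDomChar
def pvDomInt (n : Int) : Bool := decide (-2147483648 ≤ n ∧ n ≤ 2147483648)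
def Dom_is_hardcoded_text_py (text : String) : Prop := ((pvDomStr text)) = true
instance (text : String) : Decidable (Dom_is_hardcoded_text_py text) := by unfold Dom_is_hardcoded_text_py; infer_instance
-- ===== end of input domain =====

-- B replaces nine independent `indicator in text` substring searches with a single
-- left-to-right pass simulating an NFA over the indicator phrases; alternative structure.


-- ===== PORT A =====
def hardIndicatorsA : List String :=
  ["analysis reveals", "patterns indicate", "shows current performance",
   "use the executive", "monitor economic indicator", "regular review",
   "dashboard provides", "comprehensive view", "strategic insights"]

def is_hardcoded_text_py (text : String) : Bool :=
  let text_lower := PySem.Str.lower text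
  hardIndicatorsA.any (fun indicator => PySem.Str.isIn indicator text_lower)

-- ===== PORT B =====
-- B's indicator strings, ported as char lists (B manipulates them character-wise).
def hardIndicatorsB : List (List Char) :=
  ["analysis reveals".toList, "patterns indicate".toList, "shows current performance".toList,
   "use the executive".toList, "monitor economic indicator".toList, "regular review".toList,
   "dashboard provides".toList, "comprehensive view".toList, "strategic insights".toList]

-- body of B's inner loop: `rest[0] == ch` / `len(rest) == 1` / `new_active.append(rest[1:])`;
-- every `rest` handed to it is nonempty (indicators are nonempty and only nonempty tails are
-- kept), so the [] branch (where Python would raise) is unreachable.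
def bInner (ch : Char) (acc : Bool × List (List Char)) (rest : List Char) : Bool × List (List Char) :=
  if acc.1 then acc          -- `return True` already happened: rest of the loop is skipped
  else match rest with
    | [] => acc
    | c :: cs =>
      if c == ch then (if cs == [] then (true, acc.2) else (false, acc.2 ++ [cs]))
      else acc

-- one iteration of B's outer loop over the characters of the lowered text
def bStep (st : Bool × List (List Char)) (ch : Char) : Bool × List (List Char) :=
  if st.1 then st
  else (st.2 ++ hardIndicatorsB).foldl (bInner ch) (false, [])

def is_hardcoded_text_py_alt (text : String) : Bool :=
  ((PySem.Str.lower text).toList.foldl bStep (false, [])).1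

-- ===== PRECONDITION & SPEC =====
def Spec_is_hardcoded_text_py (text : String) (out : Bool) : Prop := out = is_hardcoded_text_py_alt text
instance (text : String) (out : Bool) : Decidable (Spec_is_hardcoded_text_py text out) := by unfold Spec_is_hardcoded_text_py; infer_instance

-- ===== CLAIM (what is proved, stated in full; the proofs are below) =====
def Claim_equal_is_hardcoded_text_py : Prop := ∀ (text : String), Dom_is_hardcoded_text_py text → Spec_is_hardcoded_text_py text (is_hardcoded_text_py text)

-- ===== LEMMAS AND PROOFS =====

-- the loop invariant of B: after reading prefix p, the flag says "some indicator occurs in p"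
-- and `active` holds exactly the proper nonempty indicator tails whose head part is a suffix of p
def BInv (p : List Char) (st : Bool × List (List Char)) : Prop :=
  (st.1 = true ↔ ∃ ind ∈ hardIndicatorsB, ind <:+: p) ∧
  (st.1 = false → ∀ r, r ∈ st.2 ↔
    ∃ ind ∈ hardIndicatorsB, ∃ s, s ≠ [] ∧ r ≠ [] ∧ ind = s ++ r ∧ s <:+ p)

theorem hardB_ne_nil : ∀ ind ∈ hardIndicatorsB, ind ≠ [] := by decide

theorem concat_suffix_concat (l m : List Char) (a b : Char) :
    (l ++ [a]) <:+ (m ++ [b]) ↔ a = b ∧ l <:+ m := by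
  rw [List.suffix_concat_iff]
  constructor
  · rintro (h | ⟨t, ht, hs⟩)
    · simp at h
    · obtain ⟨rfl, hab⟩ := List.append_inj' ht rfl
      injection hab with h1 _
      exact ⟨h1, hs⟩
  · rintro ⟨rfl, h⟩
    exact Or.inr ⟨l, rfl, h⟩

theorem foldl_bInner_true (ch : Char) (L : List (List Char)) (l : List (List Char)) :
    L.foldl (bInner ch) (true, l) = (true, l) := by
  induction L with
  | nil => rfl
  | cons r L ih => simpa [bInner] using ih

theorem foldl_bInner_fst (ch : Char) (L : List (List Char)) (l0 : List (List Char)) :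
    (L.foldl (bInner ch) (false, l0)).1 = true ↔ [ch] ∈ L := by
  induction L generalizing l0 with
  | nil => simp
  | cons r L ih =>
    rw [List.foldl_cons]
    match r with
    | [] =>
      rw [show bInner ch (false, l0) [] = (false, l0) from rfl, ih]
      simp
    | c :: cs =>
      by_cases hc : c = ch
      · subst hc
        by_cases hcs : cs = []
        · subst hcs
          rw [show bInner c (false, l0) [c] = (true, l0) from by simp [bInner],
            foldl_bInner_true]
          simp
        · rw [show bInner c (false, l0) (c :: cs) = (false, l0 ++ [cs]) from by
              simp [bInner, hcs], ih]
          constructor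
          · exact fun h => List.mem_cons_of_mem _ h
          · rintro h
            rcases List.mem_cons.mp h with h | h
            · injection h with _ h2
              exact absurd h2.symm hcs
            · exact h
      · rw [show bInner ch (false, l0) (c :: cs) = (false, l0) from by
            simp [bInner, hc], ih]
        constructor
        · exact fun h => List.mem_cons_of_mem _ h
        · rintro h
          rcases List.mem_cons.mp h with h | h
          · injection h with h1 _
            exact absurd h1.symm hc
          · exact h

-- the partial-advance function: what the loop appends for one considered `rest`
def bAdv (ch : Char) (r : List Char) : Option (List Char) :=
  match r with
  | [] => none
  | c :: cs => if c = ch ∧ cs ≠ [] then some cs else none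

theorem foldl_bInner_snd (ch : Char) (L : List (List Char)) (l0 : List (List Char))
    (h : [ch] ∉ L) :
    L.foldl (bInner ch) (false, l0) = (false, l0 ++ L.filterMap (bAdv ch)) := by
  induction L generalizing l0 with
  | nil => simp
  | cons r L ih =>
    have hr : r ≠ [ch] := fun hr => h (hr ▸ List.mem_cons_self)
    have hL : [ch] ∉ L := fun hL => h (List.mem_cons_of_mem _ hL)
    rw [List.foldl_cons]
    match r with
    | [] =>
      rw [show bInner ch (false, l0) [] = (false, l0) from rfl, ih _ hL]
      simp [bAdv]
    | c :: cs =>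
      by_cases hc : c = ch
      · subst hc
        have hcs : cs ≠ [] := fun hcs => hr (by rw [hcs])
        rw [show bInner c (false, l0) (c :: cs) = (false, l0 ++ [cs]) from by
            simp [bInner, hcs], ih _ hL]
        simp [bAdv, hcs]
      · rw [show bInner ch (false, l0) (c :: cs) = (false, l0) from by
            simp [bInner, hc], ih _ hL]
        simp [bAdv, hc]

theorem bStep_inv (p : List Char) (st : Bool × List (List Char)) (ch : Char)
    (h : BInv p st) : BInv (p ++ [ch]) (bStep st ch) := by
  obtain ⟨h1, h2⟩ := h
  by_cases hf : st.1 = true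
  · -- already found: the state is frozen and the occurrence persists
    constructor
    · rw [bStep, if_pos hf, hf]
      simp only [true_iff]
      obtain ⟨ind, hind, hocc⟩ := h1.mp hf
      exact ⟨ind, hind, hocc.trans (List.prefix_append p [ch]).isInfix⟩
    · intro hc
      rw [bStep, if_pos hf] at hc
      rw [hf] at hc
      cases hc
  · have hf' : st.1 = false := by simpa using hf
    have hspec := h2 hf'
    have hnot : ¬ ∃ ind ∈ hardIndicatorsB, ind <:+: p := fun hc => hf (h1.mpr hc)
    have hstep : bStep st ch = (st.2 ++ hardIndicatorsB).foldl (bInner ch) (false, []) := by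
      rw [bStep, if_neg hf]
    have hfst : (bStep st ch).1 = true ↔ ∃ ind ∈ hardIndicatorsB, ind <:+: (p ++ [ch]) := by
      rw [hstep, foldl_bInner_fst, List.mem_append]
      constructor
      · rintro (hm | hm)
        · obtain ⟨ind, hind, s, hs, -, heq, hsuf⟩ := (hspec _).mp hm
          refine ⟨ind, hind, List.IsSuffix.isInfix ?_⟩
          rw [heq]
          exact (concat_suffix_concat s p ch ch).mpr ⟨rfl, hsuf⟩
        · exact ⟨[ch], hm, (List.suffix_append p [ch]).isInfix⟩
      · rintro ⟨ind, hind, hocc⟩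
        rcases List.infix_concat_iff.mp hocc with hsuf | hinf
        · rcases List.eq_nil_or_concat ind with rfl | ⟨l', a, hind_eq⟩
          · exact absurd rfl (hardB_ne_nil _ hind)
          · rw [List.concat_eq_append] at hind_eq
            subst hind_eq
            obtain ⟨rfl, hl'⟩ := (concat_suffix_concat l' p a ch).mp hsuf
            rcases eq_or_ne l' [] with rfl | hl'ne
            · exact Or.inr (by simpa using hind)
            · exact Or.inl ((hspec [a]).mpr ⟨l' ++ [a], hind, l', hl'ne, by simp, rfl, hl'⟩)
        · exact absurd ⟨ind, hind, hinf⟩ hnot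
    refine ⟨hfst, fun hzero r => ?_⟩
    have hninL : [ch] ∉ st.2 ++ hardIndicatorsB := by
      intro hm
      have htrue := (foldl_bInner_fst ch (st.2 ++ hardIndicatorsB) []).mpr hm
      rw [← hstep] at htrue
      rw [hzero] at htrue
      cases htrue
    have hsnd : (bStep st ch).2 = (st.2 ++ hardIndicatorsB).filterMap (bAdv ch) := by
      rw [hstep, foldl_bInner_snd ch _ [] hninL]
      simp
    rw [hsnd, List.mem_filterMap]
    constructor
    · rintro ⟨rest, hrest, hadv⟩
      rcases rest with _ | ⟨c, cs⟩
      · exact absurd hadv (by simp [bAdv])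
      · rw [bAdv] at hadv
        rcases Decidable.em (c = ch ∧ cs ≠ []) with hcond | hcond
        swap
        · rw [if_neg hcond] at hadv
          cases hadv
        rw [if_pos hcond] at hadv
        obtain ⟨rfl, hcs⟩ := hcond
        injection hadv with hadv
        subst hadv
        rcases List.mem_append.mp hrest with hm | hm
        · obtain ⟨ind, hind, s0, hs0, -, heq, hsuf⟩ := (hspec _).mp hm
          exact ⟨ind, hind, s0 ++ [c], by simp, hcs, by rw [heq]; simp,
            (concat_suffix_concat s0 p c c).mpr ⟨rfl, hsuf⟩⟩
        · exact ⟨c :: cs, hm, [c], by simp, hcs, rfl, List.suffix_append p [c]⟩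
    · rintro ⟨ind, hind, s, hs, hr, heq, hsuf⟩
      rcases List.eq_nil_or_concat s with rfl | ⟨s', a, hs_eq⟩
      · exact absurd rfl hs
      · rw [List.concat_eq_append] at hs_eq
        subst hs_eq
        obtain ⟨rfl, hs'⟩ := (concat_suffix_concat s' p a ch).mp hsuf
        rcases eq_or_ne s' [] with rfl | hs'ne
        · refine ⟨ind, List.mem_append_right _ hind, ?_⟩
          rw [heq]
          simp [bAdv, hr]
        · refine ⟨a :: r, List.mem_append_left _
            ((hspec _).mpr ⟨ind, hind, s', hs'ne, by simp, by rw [heq]; simp, hs'⟩), ?_⟩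
          simp [bAdv, hr]

theorem BInv_nil : BInv [] (false, []) := by
  constructor
  · constructor
    · intro h
      cases h
    · rintro ⟨ind, hind, hocc⟩
      exact (hardB_ne_nil _ hind (List.infix_nil.mp hocc)).elim
  · intro _ r
    simp only [List.not_mem_nil, false_iff]
    rintro ⟨ind, hind, s, hs, hr, heq, hsuf⟩
    exact hs (List.eq_nil_of_suffix_nil hsuf)

theorem foldl_bStep_inv (t : List Char) :
    ∀ (p : List Char) (st : Bool × List (List Char)), BInv p st → BInv (p ++ t) (t.foldl bStep st) := by
  induction t with
  | nil => intro p st h; simpa using h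
  | cons c t ih =>
    intro p st h
    have := ih (p ++ [c]) (bStep st c) (bStep_inv p st c h)
    simpa using this

theorem hardAB : hardIndicatorsA.map String.toList = hardIndicatorsB := by decide

-- ===== VERDICT (by name: the statement is the Claim_ definition above) =====
theorem is_hardcoded_text_py_spec : Claim_equal_is_hardcoded_text_py := by
  intro text _
  unfold Spec_is_hardcoded_text_py is_hardcoded_text_py is_hardcoded_text_py_alt
  rw [Bool.eq_iff_iff]
  have hInv := foldl_bStep_inv (PySem.Str.lower text).toList [] (false, []) BInv_nil
  rw [List.nil_append] at hInv
  rw [hInv.1, List.any_eq_true]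
  constructor
  · rintro ⟨s, hs, hin⟩
    exact ⟨s.toList, hardAB ▸ List.mem_map_of_mem hs,
      (PySem.Str.isIn_iff_infix s (PySem.Str.lower text)).mp hin⟩
  · rintro ⟨ind, hind, hocc⟩
    rw [← hardAB, List.mem_map] at hind
    obtain ⟨s, hs, rfl⟩ := hind
    exact ⟨s, hs, (PySem.Str.isIn_iff_infix s (PySem.Str.lower text)).mpr hocc⟩
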